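-- pv_equiv track=rewrite | github.com/JaewanHwang/algorithm-study | pro_길 찾기 게임/황재완_2c.py | solution
-- ===== SOURCE A (Python) =====
-- from collections import defaultdict, deque
--
-- def go(num, i, levels, tree, l, r, ans, nodeinfo):
--     ans[0].append(num)
--     x, y = nodeinfo[num - 1]
--     if i + 1 < len(levels):
--         next_level = levels[i + 1]
--         if tree[next_level] and l <= tree[next_level][-1][0] < x:
--             _, child = tree[next_level].pop()
--             go(child, i + 1, levels, tree, l, x - 1, ans, nodeinfo)
--         if tree[next_level] and x < tree[next_level][-1][0] <= r:
--             _, child = tree[next_level].pop()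
--             go(child, i + 1, levels, tree, x + 1, r, ans, nodeinfo)
--     ans[1].append(num)
--
-- def solution(nodeinfo):
--     tree = defaultdict(list)
--     ans = [[], []]
--     l, r = 10_000, 1
--     for i, (x, y) in enumerate(nodeinfo, start=1):
--         tree[y].append((x, i))
--         l = min(l, x)
--         r = max(r, x)
--     for y in tree:
--         tree[y].sort(reverse=True)
--     levels = sorted(tree, reverse=True)
--     root_y = levels[0]
--     _, root_num = tree[root_y].pop()
--     go(root_num, 0, levels, tree, l, r, ans, nodeinfo)
--     return ans
-- ===== SOURCE B (Python) =====
-- from collections import deque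
--
--
-- def solution(nodeinfo):
--     by_y = {}
--     for idx, (x, y) in enumerate(nodeinfo, 1):
--         by_y.setdefault(y, []).append((x, idx))
--     ys = sorted(by_y, reverse=True)
--     rem = {y: deque(sorted(v)) for y, v in by_y.items()}
--     xs = [x for x, _ in nodeinfo]
--     lo = min([10_000] + xs)
--     hi = max([1] + xs)
--
--     def build(num, x, depth, l, r):
--         left = right = None
--         d = depth + 1
--         if d < len(ys):
--             q = rem[ys[d]]
--             if q and l <= q[0][0] < x:
--                 cx, c = q.popleft()
--                 left = build(c, cx, d, l, x - 1)
--             if q and x < q[0][0] <= r: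
--                 cx, c = q.popleft()
--                 right = build(c, cx, d, x + 1, r)
--         return (num, left, right)
--
--     rx, rnum = rem[ys[0]].popleft()
--     root = build(rnum, rx, 0, lo, hi)
--
--     def preorder(t, acc):
--         if t is not None:
--             acc.append(t[0])
--             preorder(t[1], acc)
--             preorder(t[2], acc)
--         return acc
--
--     def postorder(t, acc):
--         if t is not None:
--             postorder(t[1], acc)
--             postorder(t[2], acc)
--             acc.append(t[0])
--         return acc
--
--     return [preorder(root, []), postorder(root, [])]
-- ===== Notes on version B (the rewrite author's own statement) =====
-- stated objective: alternative
-- what changed: B separates construction from output: it groups nodes into per-level ascending queues consumed from the front, builds an explicit binary-tree structure first, and then produces the answer with two independent recursive preorder/postorder traversals, instead of A's single recursive pass that pops descending per-level stacks from the back and appends to both output lists at entry/exit while re-reading coordinates from nodeinfo.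
import Mathlib
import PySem

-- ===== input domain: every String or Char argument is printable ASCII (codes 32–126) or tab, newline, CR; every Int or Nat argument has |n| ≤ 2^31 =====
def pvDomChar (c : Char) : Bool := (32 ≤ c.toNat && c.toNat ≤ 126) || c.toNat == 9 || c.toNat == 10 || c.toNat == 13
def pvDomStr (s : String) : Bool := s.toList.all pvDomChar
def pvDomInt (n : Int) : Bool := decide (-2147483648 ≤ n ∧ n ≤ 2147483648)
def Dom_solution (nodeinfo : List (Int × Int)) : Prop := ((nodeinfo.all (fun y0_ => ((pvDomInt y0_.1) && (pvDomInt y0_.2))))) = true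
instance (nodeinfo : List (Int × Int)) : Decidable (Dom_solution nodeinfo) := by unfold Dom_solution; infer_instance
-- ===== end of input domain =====

-- B restructures A: it groups nodes into per-level ascending queues consumed from the front,
-- builds an explicit binary tree first, and then emits the answer with two separate recursive
-- traversals, instead of A's single recursive pass over descending stacks popped from the back
-- that appends to both output lists at entry/exit (objective: alternative, same cost).

-- ===== PORT A =====
-- go(num, i, levels, tree, l, r, ans, nodeinfo); the mutated 'tree' and 'ans' are threaded as state.
def goA (num : Int) (i : Nat) (levels : List Int)
    (tree : PySem.Dict Int (List (Int × Int))) (l r : Int)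
    (ans : List Int × List Int) (nodeinfo : List (Int × Int)) :
    (List Int × List Int) × PySem.Dict Int (List (Int × Int)) :=
  -- ans[0].append(num)
  let ans1 := (ans.1 ++ [num], ans.2)
  -- x, y = nodeinfo[num - 1]  (num is always a valid 1-based index when called)
  let x := ((PySem.List.pyGet? nodeinfo (num - 1)).getD (0, 0)).1
  if h : i + 1 < levels.length then
    let nl := levels[i + 1]
    let st := tree.getD nl []
    -- if tree[next_level] and l <= tree[next_level][-1][0] < x: pop; recurse
    let res1 :=
      match st.getLast? with
      | some c =>
        if l ≤ c.1 ∧ c.1 < x then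
          goA c.2 (i + 1) levels (tree.insert nl st.dropLast) l (x - 1) ans1 nodeinfo
        else (ans1, tree)
      | none => (ans1, tree)
    let st2 := res1.2.getD nl []
    -- if tree[next_level] and x < tree[next_level][-1][0] <= r: pop; recurse
    let res2 :=
      match st2.getLast? with
      | some c =>
        if x < c.1 ∧ c.1 ≤ r then
          goA c.2 (i + 1) levels (res1.2.insert nl st2.dropLast) (x + 1) r res1.1 nodeinfo
        else res1
      | none => res1
    ((res2.1.1, res2.1.2 ++ [num]), res2.2)
  else
    ((ans1.1, ans1.2 ++ [num]), tree)
termination_by levels.length - i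
decreasing_by all_goals omega

def solution (nodeinfo : List (Int × Int)) : List (List Int) :=
  -- for i, (x, y) in enumerate(nodeinfo, start=1): tree[y].append((x, i)); l = min(l, x); r = max(r, x)
  let s := nodeinfo.foldl
    (fun (s : PySem.Dict Int (List (Int × Int)) × Int × Int × Int) p =>
      (s.1.modify p.2 [] (· ++ [(p.1, s.2.2.2)]), min s.2.1 p.1, max s.2.2.1 p.1, s.2.2.2 + 1))
    (PySem.Dict.empty, 10000, 1, 1)
  let tree := s.1
  let l := s.2.1
  let r := s.2.2.1
  -- for y in tree: tree[y].sort(reverse=True)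
  let tree := tree.keys.foldl
    (fun t y => t.insert y (PySem.List.sorted2 (t.getD y []) Prod.fst Prod.snd true)) tree
  -- levels = sorted(tree, reverse=True)
  let levels := PySem.List.sorted tree.keys (fun v => v) true
  match levels with
  | [] => []  -- Python raises IndexError here (only for nodeinfo = []); excluded by Pre_solution
  | rootY :: _ =>
    let st := tree.getD rootY []
    match st.getLast? with
    | none => []  -- unreachable: every level list is nonempty
    | some rootP =>
      let tree := tree.insert rootY st.dropLast
      let ans := (goA rootP.2 0 levels tree l r ([], []) nodeinfo).1
      [ans.1, ans.2]

-- ===== PORT B =====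
inductive BTree where
  | nil : BTree
  | node : Int → BTree → BTree → BTree
deriving DecidableEq, Repr

-- build(num, x, depth, l, r): pops children off the front of the next level's queue, returns a tree
def buildB (num x : Int) (depth : Nat) (l r : Int) (ys : List Int)
    (rem : PySem.Dict Int (List (Int × Int))) : BTree × PySem.Dict Int (List (Int × Int)) :=
  if h : depth + 1 < ys.length then
    let q := rem.getD ys[depth + 1] []
    let res1 :=
      match q.head? with
      | some c =>
        if l ≤ c.1 ∧ c.1 < x then
          buildB c.2 c.1 (depth + 1) l (x - 1) ys (rem.insert ys[depth + 1] q.tail)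
        else (BTree.nil, rem)
      | none => (BTree.nil, rem)
    let q2 := res1.2.getD ys[depth + 1] []
    let res2 :=
      match q2.head? with
      | some c =>
        if x < c.1 ∧ c.1 ≤ r then
          buildB c.2 c.1 (depth + 1) (x + 1) r ys (res1.2.insert ys[depth + 1] q2.tail)
        else (BTree.nil, res1.2)
      | none => (BTree.nil, res1.2)
    (BTree.node num res1.1 res2.1, res2.2)
  else (BTree.node num BTree.nil BTree.nil, rem)
termination_by ys.length - depth
decreasing_by all_goals omega

def preT : BTree → List Int → List Int
  | .nil, acc => acc
  | .node n a b, acc => preT b (preT a (acc ++ [n]))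

def postT : BTree → List Int → List Int
  | .nil, acc => acc
  | .node n a b, acc => postT b (postT a acc) ++ [n]

def solution_alt (nodeinfo : List (Int × Int)) : List (List Int) :=
  -- by_y.setdefault(y, []).append((x, idx))
  let s := nodeinfo.foldl
    (fun (s : PySem.Dict Int (List (Int × Int)) × Int) p =>
      (s.1.modify p.2 [] (· ++ [(p.1, s.2)]), s.2 + 1)) (PySem.Dict.empty, 1)
  let byY := s.1
  let ys := PySem.List.sorted byY.keys (fun v => v) true
  -- rem = {y: deque(sorted(v)) for y, v in by_y.items()}
  let rem := byY.items.foldl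
    (fun d kv => d.insert kv.1 (PySem.List.sorted2 kv.2 Prod.fst Prod.snd false)) PySem.Dict.empty
  let xs := nodeinfo.map Prod.fst
  let lo := (PySem.List.min? (10000 :: xs) (fun v => v)).getD 0
  let hi := (PySem.List.max? (1 :: xs) (fun v => v)).getD 0
  match ys with
  | [] => []  -- Python raises here (only for nodeinfo = []); excluded by Pre_solution
  | y0 :: _ =>
    let q := rem.getD y0 []
    match q.head? with
    | none => []  -- unreachable: every level queue is nonempty
    | some rootP =>
      let rem := rem.insert y0 q.tail
      let root := (buildB rootP.2 rootP.1 0 lo hi ys rem).1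
      [preT root [], postT root []]

-- ===== PRECONDITION & SPEC =====
-- Pre_ excludes only the empty list, on which A raises IndexError (levels[0]).
def Pre_solution (nodeinfo : List (Int × Int)) : Prop := nodeinfo ≠ []
instance (nodeinfo : List (Int × Int)) : Decidable (Pre_solution nodeinfo) := by
  unfold Pre_solution; infer_instance
def pvWitness_solution : (List (Int × Int)) := [(1, 1)]

def Spec_solution (nodeinfo : List (Int × Int)) (out : List (List Int)) : Prop := out = solution_alt nodeinfo
instance (nodeinfo : List (Int × Int)) (out : List (List Int)) : Decidable (Spec_solution nodeinfo out) := by unfold Spec_solution; infer_instance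

-- ===== CLAIM (what is proved, stated in full; the proofs are below) =====
def Claim_equal_solution : Prop := ∀ (nodeinfo : List (Int × Int)), Dom_solution nodeinfo → Pre_solution nodeinfo → Spec_solution nodeinfo (solution nodeinfo)

-- ===== LEMMAS AND PROOFS =====

-- enumerate(nodeinfo, start=1), reshaped as (y, (x, i)) so that dict-grouping lemmas apply
def enumFrom : Int → List (Int × Int) → List (Int × (Int × Int))
  | _, [] => []
  | i, p :: t => (p.2, (p.1, i)) :: enumFrom (i + 1) t

-- the grouped dict both ports build
def groupD (nodeinfo : List (Int × Int)) : PySem.Dict Int (List (Int × Int)) :=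
  (enumFrom 1 nodeinfo).foldl (fun d p => d.modify p.1 [] (· ++ [p.2])) PySem.Dict.empty

-- the (ascending) per-level list
def lvl (nodeinfo : List (Int × Int)) (k : Int) : List (Int × Int) :=
  ((enumFrom 1 nodeinfo).filter (fun p => p.1 == k)).map (·.2)

theorem foldA_eq (xs : List (Int × Int)) :
    ∀ (d : PySem.Dict Int (List (Int × Int))) (l r i : Int),
    xs.foldl (fun s p => (s.1.modify p.2 [] (· ++ [(p.1, s.2.2.2)]),
        min s.2.1 p.1, max s.2.2.1 p.1, s.2.2.2 + 1)) (d, l, r, i)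
      = ((enumFrom i xs).foldl (fun d p => d.modify p.1 [] (· ++ [p.2])) d,
         xs.foldl (fun a p => min a p.1) l, xs.foldl (fun a p => max a p.1) r, i + xs.length) := by
  induction xs with
  | nil => intro d l r i; simp [enumFrom]
  | cons p t ih =>
    intro d l r i
    simp only [List.foldl_cons, enumFrom, ih, List.length_cons]
    simp [Prod.ext_iff]; ring

theorem foldB_eq (xs : List (Int × Int)) :
    ∀ (d : PySem.Dict Int (List (Int × Int))) (i : Int),
    xs.foldl (fun s p => (s.1.modify p.2 [] (· ++ [(p.1, s.2)]), s.2 + 1)) (d, i)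
      = ((enumFrom i xs).foldl (fun d p => d.modify p.1 [] (· ++ [p.2])) d, i + xs.length) := by
  induction xs with
  | nil => intro d i; simp [enumFrom]
  | cons p t ih =>
    intro d i
    simp only [List.foldl_cons, enumFrom, ih, List.length_cons]
    simp [Prod.ext_iff]; ring

theorem getD_groupD (nodeinfo : List (Int × Int)) (k : Int) :
    (groupD nodeinfo).getD k [] = lvl nodeinfo k := by
  simp [groupD, lvl, PySem.Dict.getD_foldl_modify_append]

theorem keys_groupD (nodeinfo : List (Int × Int)) :
    (groupD nodeinfo).keys = PySem.Set.ofList ((enumFrom 1 nodeinfo).map (·.1)) := by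
  simp [groupD, PySem.Dict.keys_foldl_modify_key, PySem.Set.update, PySem.Set.ofList_eq_foldl]

theorem ltlex (a b : Int × Int) :
    (decide (a.1 < b.1) || (!decide (b.1 < a.1) && decide (a.2 < b.2))) = decide (toLex a < toLex b) := by
  obtain ⟨a1, a2⟩ := a; obtain ⟨b1, b2⟩ := b
  by_cases h1 : a1 < b1 <;> by_cases h2 : b1 < a1 <;> by_cases h3 : a2 < b2 <;>
    simp [Prod.Lex.lt_iff, h1, h2, h3] <;> omega

-- sorted2 with fst/snd keys is sorted with the lexicographic key
theorem sorted2_eq_sorted_lex (xs : List (Int × Int)) (rev : Bool) :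
    PySem.List.sorted2 xs Prod.fst Prod.snd rev
      = PySem.List.sorted xs (fun p => toLex p) rev := by
  simp only [PySem.List.sorted2, PySem.List.sorted]
  cases rev
  · simp only [Bool.false_eq_true, if_false]
    have h : (fun (a b : Int × Int) => decide (a.1 < b.1) || (!decide (b.1 < a.1) && decide (a.2 < b.2)))
        = fun a b => decide (toLex a < toLex b) := by
      funext a b; exact ltlex a b
    rw [h]
  · simp only [if_true]
    have h : (fun (a b : Int × Int) => decide (b.1 < a.1) || (!decide (a.1 < b.1) && decide (b.2 < a.2)))
        = fun a b => decide (toLex b < toLex a) := by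
      funext a b; exact ltlex b a
    rw [h]

-- the in-place sorting pass of A, characterised by lookups
theorem sortpass_getD (ks : List Int) :
    ∀ (t : PySem.Dict Int (List (Int × Int))) (k : Int), ks.Nodup →
    ((ks.foldl (fun t y => t.insert y (PySem.List.sorted2 (t.getD y []) Prod.fst Prod.snd true)) t).getD k [])
      = if k ∈ ks then PySem.List.sorted2 (t.getD k []) Prod.fst Prod.snd true else t.getD k [] := by
  induction ks with
  | nil => intro t k _; simp
  | cons y ks ih =>
    intro t k hnd
    obtain ⟨hy, hnd'⟩ := List.nodup_cons.mp hnd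
    simp only [List.foldl_cons]
    rw [ih _ k hnd']
    by_cases hk : k ∈ ks
    · have hky : k ≠ y := fun h => hy (h ▸ hk)
      simp [hk, hky, PySem.Dict.getD_insert_of_ne _ _ _ hky, List.mem_cons]
    · by_cases hky : k = y
      · subst hky
        simp [hk, PySem.Dict.getD_insert_self]
      · simp [hk, hky, PySem.Dict.getD_insert_of_ne _ _ _ hky]

theorem sortpass_keys (ks : List Int) :
    ∀ (t : PySem.Dict Int (List (Int × Int))), (∀ y ∈ ks, y ∈ t.keys) →
    ((ks.foldl (fun t y => t.insert y (PySem.List.sorted2 (t.getD y []) Prod.fst Prod.snd true)) t).keys)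
      = t.keys := by
  induction ks with
  | nil => intro t _; simp
  | cons y ks ih =>
    intro t hmem
    simp only [List.foldl_cons]
    have hy : t.contains y = true := (PySem.Dict.contains_iff_mem_keys _ _).mpr (hmem y (by simp))
    have hkeys : (t.insert y (PySem.List.sorted2 (t.getD y []) Prod.fst Prod.snd true)).keys = t.keys :=
      PySem.Dict.keys_insert_of_contains _ _ hy
    rw [ih _ (by intro z hz; rw [hkeys]; exact hmem z (by simp [hz])), hkeys]

-- the fresh-key insert fold of B, characterised by lookups
theorem insfold_getD (ks : List Int) (F : Int → List (Int × Int)) :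
    ∀ (d : PySem.Dict Int (List (Int × Int))) (k : Int), ks.Nodup →
    ((ks.foldl (fun d y => d.insert y (F y)) d).getD k [])
      = if k ∈ ks then F k else d.getD k [] := by
  induction ks with
  | nil => intro d k _; simp
  | cons y t ih =>
    intro d k hnd
    simp only [List.foldl_cons]
    rw [ih _ k (List.nodup_cons.mp hnd).2]
    by_cases hk : k ∈ t
    · simp [hk, List.mem_cons]
    · by_cases hky : k = y
      · subst hky
        simp [hk, PySem.Dict.getD_insert_self]
      · simp [hk, hky, PySem.Dict.getD_insert_of_ne _ _ _ hky]

-- ascending sort is the reverse of descending sort on a duplicate-free list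
theorem asc_eq_reverse_desc (xs : List (Int × Int)) (h : (xs.map (·.2)).Pairwise (· < ·)) :
    PySem.List.sorted2 xs Prod.fst Prod.snd false
      = (PySem.List.sorted2 xs Prod.fst Prod.snd true).reverse := by
  rw [sorted2_eq_sorted_lex, sorted2_eq_sorted_lex]
  have hnd : xs.Nodup := by
    refine (List.pairwise_map.mp h).imp ?_
    intro a b hab heq; rw [heq] at hab; exact lt_irrefl _ hab
  set key : Int × Int → Lex (Int × Int) := fun p => toLex p with hkey
  have hperm := PySem.List.sorted_perm xs key false
  have hascnd : (PySem.List.sorted xs key false).Nodup := hperm.nodup_iff.mpr hnd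
  have hle : (PySem.List.sorted xs key false).Pairwise (fun a b => key a ≤ key b) :=
    PySem.List.sorted_pairwise xs key
  have hlt : (PySem.List.sorted xs key false).Pairwise (fun a b => key a < key b) := by
    refine (hle.and hascnd).imp ?_
    rintro a b ⟨h1, h2⟩
    refine lt_of_le_of_ne h1 (fun hc => h2 ?_)
    simpa [hkey] using hc
  have hdesc : PySem.List.sorted xs key true = (PySem.List.sorted xs key false).reverse := by
    refine PySem.List.sorted_rev_eq_of_perm_of_pairwise_gt xs _ key
      ((List.reverse_perm _).trans hperm) ?_
    rw [List.pairwise_reverse]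
    exact hlt
  rw [hdesc, List.reverse_reverse]

-- each entry of enumFrom records its position
theorem enumFrom_mem (xs : List (Int × Int)) :
    ∀ (i : Int) p, p ∈ enumFrom i xs →
    ∃ m : Nat, p.2.2 = i + m ∧ xs[m]? = some (p.2.1, p.1) := by
  induction xs with
  | nil => intro i p h; simp [enumFrom] at h
  | cons q t ih =>
    intro i p h
    rw [enumFrom, List.mem_cons] at h
    rcases h with h | h
    · exact ⟨0, by simp [h]⟩
    · obtain ⟨m, hm, hg⟩ := ih (i + 1) p h
      exact ⟨m + 1, by push_cast; omega, by simpa using hg⟩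

-- indices in enumFrom are strictly increasing
theorem enumFrom_snd_pairwise (xs : List (Int × Int)) :
    ∀ i, (enumFrom i xs).Pairwise (fun p q => p.2.2 < q.2.2) := by
  induction xs with
  | nil => intro i; simp [enumFrom]
  | cons q t ih =>
    intro i
    rw [enumFrom, List.pairwise_cons]
    refine ⟨fun p hp => ?_, ih (i + 1)⟩
    obtain ⟨m, hm, -⟩ := enumFrom_mem t (i + 1) p hp
    simp only
    omega

theorem lvl_snd_pairwise (nodeinfo : List (Int × Int)) (k : Int) :
    ((lvl nodeinfo k).map (·.2)).Pairwise (· < ·) := by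
  unfold lvl
  rw [List.map_map, List.pairwise_map]
  exact (enumFrom_snd_pairwise nodeinfo 1).filter _

-- members of a level list look their x back up correctly
theorem lvl_lookup (nodeinfo : List (Int × Int)) (k : Int) (p : Int × Int)
    (hp : p ∈ lvl nodeinfo k) :
    ((PySem.List.pyGet? nodeinfo (p.2 - 1)).getD (0, 0)).1 = p.1 := by
  unfold lvl at hp
  rw [List.mem_map] at hp
  obtain ⟨q, hq, hqp⟩ := hp
  obtain ⟨m, hm, hg⟩ := enumFrom_mem nodeinfo 1 q (List.mem_of_mem_filter hq)
  have : p.2 - 1 = (m : Int) := by rw [← hqp]; omega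
  rw [this, PySem.List.pyGet?_natCast, hg, ← hqp]
  simp

theorem preT_acc (t : BTree) : ∀ acc, preT t acc = acc ++ preT t [] := by
  induction t with
  | nil => intro acc; simp [preT]
  | node n a b iha ihb =>
    intro acc
    simp only [preT]
    rw [ihb, iha, ihb (preT a ([] ++ [n])), iha ([] ++ [n])]
    simp

theorem postT_acc (t : BTree) : ∀ acc, postT t acc = acc ++ postT t [] := by
  induction t with
  | nil => intro acc; simp [postT]
  | node n a b iha ihb =>
    intro acc
    simp only [postT]
    rw [iha acc, ihb, ihb (postT a [])]
    simp

def RevRel (tree rem : PySem.Dict Int (List (Int × Int))) : Prop :=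
  ∀ k, rem.getD k [] = (tree.getD k []).reverse

def LookupOK (nodeinfo : List (Int × Int)) (tree : PySem.Dict Int (List (Int × Int))) : Prop :=
  ∀ k p, p ∈ tree.getD k [] → ((PySem.List.pyGet? nodeinfo (p.2 - 1)).getD (0, 0)).1 = p.1

theorem revRel_insert (tree rem : PySem.Dict Int (List (Int × Int))) (nl : Int)
    (v : List (Int × Int)) (h : RevRel tree rem) :
    RevRel (tree.insert nl v) (rem.insert nl v.reverse) := by
  intro k
  by_cases hk : k = nl
  · subst hk; simp [PySem.Dict.getD_insert_self]
  · rw [PySem.Dict.getD_insert_of_ne _ _ _ hk, PySem.Dict.getD_insert_of_ne _ _ _ hk]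
    exact h k

theorem lookupOK_insert (nodeinfo : List (Int × Int)) (tree : PySem.Dict Int (List (Int × Int)))
    (nl : Int) (v : List (Int × Int)) (h : LookupOK nodeinfo tree)
    (hsub : ∀ p ∈ v, p ∈ tree.getD nl []) : LookupOK nodeinfo (tree.insert nl v) := by
  intro k p hp
  by_cases hk : k = nl
  · subst hk; rw [PySem.Dict.getD_insert_self] at hp; exact h _ p (hsub p hp)
  · rw [PySem.Dict.getD_insert_of_ne _ _ _ hk] at hp; exact h k p hp

theorem go_build (n : Nat) :
    ∀ (num x : Int) (i : Nat) (levels : List Int)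
      (tree rem : PySem.Dict Int (List (Int × Int))) (l r : Int)
      (ans : List Int × List Int) (nodeinfo : List (Int × Int)),
    levels.length - i ≤ n →
    RevRel tree rem →
    ((PySem.List.pyGet? nodeinfo (num - 1)).getD (0, 0)).1 = x →
    LookupOK nodeinfo tree →
    (goA num i levels tree l r ans nodeinfo).1
        = (ans.1 ++ preT (buildB num x i l r levels rem).1 [],
           ans.2 ++ postT (buildB num x i l r levels rem).1 [])
      ∧ RevRel (goA num i levels tree l r ans nodeinfo).2 (buildB num x i l r levels rem).2
      ∧ LookupOK nodeinfo (goA num i levels tree l r ans nodeinfo).2 := by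
  induction n with
  | zero =>
    intro num x i levels tree rem l r ans nodeinfo hn hrel hx hmem
    have hlt : ¬ (i + 1 < levels.length) := by omega
    rw [goA, buildB]
    simp only [dif_neg hlt]
    exact ⟨by simp [preT, postT], hrel, hmem⟩
  | succ n ih =>
    intro num x i levels tree rem l r ans nodeinfo hn hrel hx hmem
    by_cases hlt : i + 1 < levels.length
    · have hfuel : levels.length - (i + 1) ≤ n := by omega
      rw [goA, buildB]
      simp only [dif_pos hlt, hx, hrel levels[i+1], List.head?_reverse, List.tail_reverse]
      generalize hst : tree.getD levels[i+1] [] = st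
      have hsub : ∀ p ∈ st.dropLast, p ∈ tree.getD levels[i+1] [] := by
        rw [hst]; exact fun p hp => (List.dropLast_sublist _).subset hp
      rcases hlast : st.getLast? with _ | c
      all_goals simp only [hlast]
      · -- none: no left child; step 2 reads the same list
        simp only [hrel levels[i+1], List.head?_reverse, List.tail_reverse, hst, hlast]
        exact ⟨by simp [preT, postT], hrel, hmem⟩
      · -- some c: c may become left child (then step 2 re-reads) or right child
        have hcmem : c ∈ tree.getD levels[i+1] [] := by
          rw [hst]; exact List.mem_of_getLast? hlast
        have hcx : ((PySem.List.pyGet? nodeinfo (c.2 - 1)).getD (0, 0)).1 = c.1 :=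
          hmem _ c hcmem
        by_cases hc1 : l ≤ c.1 ∧ c.1 < x
        · simp only [if_pos hc1]
          obtain ⟨h1, h2, h3⟩ := ih c.2 c.1 (i+1) levels
            (tree.insert levels[i+1] st.dropLast)
            (rem.insert levels[i+1] st.dropLast.reverse)
            l (x - 1) (ans.1 ++ [num], ans.2) nodeinfo hfuel
            (revRel_insert tree rem levels[i+1] st.dropLast hrel) hcx
            (lookupOK_insert _ _ _ _ hmem hsub)
          set GA := goA c.2 (i+1) levels (tree.insert levels[i+1] st.dropLast)
            l (x - 1) (ans.1 ++ [num], ans.2) nodeinfo with hGA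
          set BB := buildB c.2 c.1 (i+1) l (x - 1) levels
            (rem.insert levels[i+1] st.dropLast.reverse) with hBB
          unfold RevRel at h2
          simp only [h2, List.head?_reverse, List.tail_reverse]
          generalize hst2v : GA.2.getD levels[i+1] [] = st2
          have hsub2 : ∀ p ∈ st2.dropLast, p ∈ GA.2.getD levels[i+1] [] := by
            rw [hst2v]; exact fun p hp => (List.dropLast_sublist _).subset hp
          rcases hlast2 : st2.getLast? with _ | c2
          all_goals try simp only [hlast2]
          · exact ⟨by simp only [preT, postT]; rw [preT_acc BB.1 ([] ++ [num])]; simp [h1], h2, h3⟩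
          · have hc2x : ((PySem.List.pyGet? nodeinfo (c2.2 - 1)).getD (0, 0)).1 = c2.1 :=
              h3 _ c2 (by rw [hst2v]; exact List.mem_of_getLast? hlast2)
            by_cases hc2 : x < c2.1 ∧ c2.1 ≤ r
            · simp only [if_pos hc2]
              obtain ⟨g1, g2, g3⟩ := ih c2.2 c2.1 (i+1) levels
                (GA.2.insert levels[i+1] st2.dropLast)
                (BB.2.insert levels[i+1] st2.dropLast.reverse)
                (x + 1) r GA.1 nodeinfo hfuel
                (revRel_insert GA.2 BB.2 levels[i+1] st2.dropLast h2) hc2x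
                (lookupOK_insert _ _ _ _ h3 hsub2)
              exact ⟨by simp only [preT, postT]; rw [preT_acc _ (preT BB.1 ([] ++ [num])), preT_acc BB.1 ([] ++ [num]), postT_acc _ (postT BB.1 [])]; simp only [g1]; simp [h1], g2, g3⟩
            · simp only [if_neg hc2]
              exact ⟨by simp only [preT, postT]; rw [preT_acc BB.1 ([] ++ [num])]; simp [h1], h2, h3⟩
        · simp only [if_neg hc1]
          simp only [hrel levels[i+1], List.head?_reverse, List.tail_reverse, hst, hlast]
          by_cases hc2 : x < c.1 ∧ c.1 ≤ r
          · simp only [if_pos hc2]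
            obtain ⟨g1, g2, g3⟩ := ih c.2 c.1 (i+1) levels
              (tree.insert levels[i+1] st.dropLast)
              (rem.insert levels[i+1] st.dropLast.reverse)
              (x + 1) r (ans.1 ++ [num], ans.2) nodeinfo hfuel
              (revRel_insert tree rem levels[i+1] st.dropLast hrel) hcx
              (lookupOK_insert _ _ _ _ hmem hsub)
            exact ⟨by simp only [preT, postT]; rw [preT_acc _ ([] ++ [num])]; simp [g1], g2, g3⟩
          · simp only [if_neg hc2]
            exact ⟨by simp [preT, postT], hrel, hmem⟩
    · rw [goA, buildB]
      simp only [dif_neg hlt]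
      exact ⟨by simp [preT, postT], hrel, hmem⟩

-- named intermediate states of the two pipelines
def treeS (nodeinfo : List (Int × Int)) : PySem.Dict Int (List (Int × Int)) :=
  (groupD nodeinfo).keys.foldl
    (fun t y => t.insert y (PySem.List.sorted2 (t.getD y []) Prod.fst Prod.snd true)) (groupD nodeinfo)

def remB (nodeinfo : List (Int × Int)) : PySem.Dict Int (List (Int × Int)) :=
  (groupD nodeinfo).items.foldl
    (fun d kv => d.insert kv.1 (PySem.List.sorted2 kv.2 Prod.fst Prod.snd false)) PySem.Dict.empty

theorem keys_nodup (nodeinfo : List (Int × Int)) : (groupD nodeinfo).keys.Nodup := by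
  rw [keys_groupD]; exact PySem.Set.nodup_ofList _

theorem lvl_eq_nil_of_not_mem (nodeinfo : List (Int × Int)) (k : Int)
    (h : k ∉ (groupD nodeinfo).keys) : lvl nodeinfo k = [] := by
  rw [keys_groupD] at h
  unfold lvl
  rw [List.map_eq_nil_iff, List.filter_eq_nil_iff]
  intro p hp hq
  refine h ?_
  rw [PySem.Set.mem_ofList]
  have : p.1 = k := by simpa using hq
  exact this ▸ List.mem_map_of_mem hp

theorem treeS_getD (nodeinfo : List (Int × Int)) (k : Int) :
    (treeS nodeinfo).getD k [] = PySem.List.sorted2 (lvl nodeinfo k) Prod.fst Prod.snd true := by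
  unfold treeS
  rw [sortpass_getD _ _ _ (keys_nodup _)]
  by_cases hk : k ∈ (groupD nodeinfo).keys
  · rw [if_pos hk, getD_groupD]
  · rw [if_neg hk, getD_groupD, lvl_eq_nil_of_not_mem _ _ hk]
    rfl

theorem remB_getD (nodeinfo : List (Int × Int)) (k : Int) :
    (remB nodeinfo).getD k [] = PySem.List.sorted2 (lvl nodeinfo k) Prod.fst Prod.snd false := by
  unfold remB
  rw [PySem.Dict.items_eq_map_keys _ (keys_nodup _) [], List.foldl_map]
  rw [insfold_getD _ _ _ _ (keys_nodup _)]
  by_cases hk : k ∈ (groupD nodeinfo).keys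
  · rw [if_pos hk, getD_groupD]
  · rw [if_neg hk, lvl_eq_nil_of_not_mem _ _ hk]
    rfl

theorem treeS_keys (nodeinfo : List (Int × Int)) : (treeS nodeinfo).keys = (groupD nodeinfo).keys :=
  sortpass_keys _ _ (fun _ hy => hy)

theorem main_rel (nodeinfo : List (Int × Int)) : RevRel (treeS nodeinfo) (remB nodeinfo) := by
  intro k
  rw [treeS_getD, remB_getD]
  exact asc_eq_reverse_desc _ (lvl_snd_pairwise nodeinfo k)

theorem main_lookup (nodeinfo : List (Int × Int)) : LookupOK nodeinfo (treeS nodeinfo) := by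
  intro k p hp
  rw [treeS_getD] at hp
  exact lvl_lookup nodeinfo k p ((PySem.List.sorted2_perm _ _ _ _).mem_iff.mp hp)

theorem lo_eq (nodeinfo : List (Int × Int)) :
    (PySem.List.min? ((10000 : Int) :: nodeinfo.map Prod.fst) (fun v => v)).getD 0
      = nodeinfo.foldl (fun a p => min a p.1) 10000 := by
  rw [PySem.List.min?_id_cons]
  simp [List.foldl_map]

theorem hi_eq (nodeinfo : List (Int × Int)) :
    (PySem.List.max? ((1 : Int) :: nodeinfo.map Prod.fst) (fun v => v)).getD 0
      = nodeinfo.foldl (fun a p => max a p.1) 1 := by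
  rw [PySem.List.max?_id_cons]
  simp [List.foldl_map]

-- ===== VERDICT (by name: the statement is the Claim_ definition above) =====
theorem solution_spec : Claim_equal_solution := by
  intro nodeinfo _ hpre
  unfold Spec_solution solution solution_alt
  simp only [foldA_eq, foldB_eq]
  have hG : (enumFrom 1 nodeinfo).foldl (fun d p => d.modify p.1 [] (· ++ [p.2])) PySem.Dict.empty
      = groupD nodeinfo := rfl
  rw [hG]
  have hT : (groupD nodeinfo).keys.foldl
      (fun t y => t.insert y (PySem.List.sorted2 (t.getD y []) Prod.fst Prod.snd true)) (groupD nodeinfo)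
      = treeS nodeinfo := rfl
  have hR : (groupD nodeinfo).items.foldl
      (fun d kv => d.insert kv.1 (PySem.List.sorted2 kv.2 Prod.fst Prod.snd false)) PySem.Dict.empty
      = remB nodeinfo := rfl
  rw [hT, hR, treeS_keys, lo_eq, hi_eq]
  rcases hlev : PySem.List.sorted (groupD nodeinfo).keys (fun v => v) true with _ | ⟨rootY, rest⟩
  · rfl
  · have hq : (remB nodeinfo).getD rootY []
        = ((treeS nodeinfo).getD rootY []).reverse := main_rel nodeinfo rootY
    dsimp only
    rw [hq, List.head?_reverse, List.tail_reverse]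
    rcases hroot : ((treeS nodeinfo).getD rootY []).getLast? with _ | rootP
    · rfl
    · have hrootMem : rootP ∈ (treeS nodeinfo).getD rootY [] := List.mem_of_getLast? hroot
      have hx : ((PySem.List.pyGet? nodeinfo (rootP.2 - 1)).getD (0, 0)).1 = rootP.1 :=
        main_lookup nodeinfo rootY rootP hrootMem
      obtain ⟨h1, h2, h3⟩ := go_build (rootY :: rest).length rootP.2 rootP.1 0 (rootY :: rest)
        ((treeS nodeinfo).insert rootY ((treeS nodeinfo).getD rootY []).dropLast)
        ((remB nodeinfo).insert rootY ((treeS nodeinfo).getD rootY []).dropLast.reverse)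
        (nodeinfo.foldl (fun a p => min a p.1) 10000)
        (nodeinfo.foldl (fun a p => max a p.1) 1)
        ([], []) nodeinfo (by omega)
        (revRel_insert _ _ _ _ (main_rel nodeinfo)) hx
        (lookupOK_insert _ _ _ _ (main_lookup nodeinfo)
          (fun p hp => (List.dropLast_sublist _).subset hp))
      simp only [h1]
      simp
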